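-- pv_equiv track=rewrite | github.com/lilingxi01/temporal-wiki-project | python/ergodiff/postprocess.py | track_changes
-- ===== SOURCE A (Python) =====
-- from typing import Iterator, List
--
-- def get_waypoint(start: int, end: int, forward_waypoints: List[int], backward_waypoints: List[int]):
--     start_pos = start if backward_waypoints[start] == -1 else backward_waypoints[start]
--     end_pos = end if forward_waypoints[end - 1] == -1 else forward_waypoints[end - 1]
--     return start_pos, end_pos
--
-- def track_changes(change_pattern: str, target: str, forward_waypoints: List[int], backward_waypoints: List[int]):
--     changes = []
--     opened = False
--     curr_start = -1
--
--     for index, character in enumerate(change_pattern):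
--         if character == target:
--             if not opened:
--                 opened = True
--                 curr_start = index
--         else:
--             if opened:
--                 opened = False
--                 changes.append(get_waypoint(curr_start, index, forward_waypoints, backward_waypoints))
--
--     if opened:
--         changes.append(get_waypoint(curr_start, len(change_pattern), forward_waypoints, backward_waypoints))
--
--     return changes
-- ===== SOURCE B (Python) =====
-- from typing import List
--
--
-- def get_waypoint(start: int, end: int, forward_waypoints: List[int], backward_waypoints: List[int]):
--     start_pos = start if backward_waypoints[start] == -1 else backward_waypoints[start]
--     end_pos = end if forward_waypoints[end - 1] == -1 else forward_waypoints[end - 1]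
--     return start_pos, end_pos
--
--
-- def track_changes(change_pattern: str, target: str, forward_waypoints: List[int], backward_waypoints: List[int]):
--     # Staged set-based pass: collect the set of hit indices, then read off run
--     # boundaries by neighbour membership and pair them up in sorted order.
--     hits = {i for i, ch in enumerate(change_pattern) if ch == target}
--     starts = sorted(i for i in hits if i - 1 not in hits)
--     ends = sorted(i + 1 for i in hits if i + 1 not in hits)
--     return [get_waypoint(s, e, forward_waypoints, backward_waypoints)
--             for s, e in zip(starts, ends)]
-- ===== Notes on version B (the rewrite author's own statement) =====
-- stated objective: alternative
-- what changed: Replaces A's single-pass opened/curr_start state machine (with a trailing-flush special case) by a staged, set-based computation: build the set of indices holding the target, derive run starts and run ends independently by neighbour-membership tests, and zip the two sorted boundary lists into waypoints.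
import Mathlib
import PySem

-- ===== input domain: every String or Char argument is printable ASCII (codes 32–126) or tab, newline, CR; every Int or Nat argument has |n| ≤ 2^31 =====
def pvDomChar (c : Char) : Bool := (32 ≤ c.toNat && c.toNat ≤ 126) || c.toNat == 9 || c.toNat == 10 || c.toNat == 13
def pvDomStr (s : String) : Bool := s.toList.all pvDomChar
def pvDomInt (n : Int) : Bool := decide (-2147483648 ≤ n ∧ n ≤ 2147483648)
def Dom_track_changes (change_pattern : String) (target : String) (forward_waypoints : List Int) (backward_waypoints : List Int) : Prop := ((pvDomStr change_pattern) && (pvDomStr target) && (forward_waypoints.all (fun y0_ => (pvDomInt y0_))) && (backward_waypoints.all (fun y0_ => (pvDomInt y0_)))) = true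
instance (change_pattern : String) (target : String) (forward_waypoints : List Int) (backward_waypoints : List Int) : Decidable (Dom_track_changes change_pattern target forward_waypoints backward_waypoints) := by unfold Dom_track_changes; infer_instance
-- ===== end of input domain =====

-- B replaces A's single-pass opened/curr_start state machine (with trailing flush) by a staged,
-- set-based computation: the set of hit indices, run starts/ends by neighbour membership, zipped.
-- Objective: alternative decomposition, same cost. Both Pythons raise IndexError on the same
-- waypoint-out-of-range inputs; Pre_ excludes exactly those.

-- ===== PORT A =====
-- helper shared by both Python sources verbatim; indexing via pyGet? (in range under Pre_; default 0 never claimed)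
def get_waypoint (start : Int) (end_ : Int) (forward_waypoints : List Int) (backward_waypoints : List Int) : Int × Int :=
  let b := (PySem.List.pyGet? backward_waypoints start).getD 0
  let f := (PySem.List.pyGet? forward_waypoints (end_ - 1)).getD 0
  ((if b = -1 then start else b), (if f = -1 then end_ else f))

def pvStepA (target : String) (fw bw : List Int) (s : List (Int × Int) × Bool × Int) (ic : Int × Char) : List (Int × Int) × Bool × Int :=
  match s, ic with
  | (changes, opened, curr_start), (index, character) =>
    if String.singleton character = target then
      if !opened then (changes, true, index) else (changes, opened, curr_start)
    else
      if opened then (changes ++ [get_waypoint curr_start index fw bw], false, curr_start)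
      else (changes, opened, curr_start)

def track_changes (change_pattern : String) (target : String) (forward_waypoints : List Int) (backward_waypoints : List Int) : List (Int × Int) :=
  let r := (PySem.List.enumerate change_pattern.toList 0).foldl (pvStepA target forward_waypoints backward_waypoints) ([], false, -1)
  if r.2.1 then r.1 ++ [get_waypoint r.2.2 (PySem.Str.len change_pattern) forward_waypoints backward_waypoints] else r.1

-- ===== PORT B =====
-- hits = {i for i, ch in enumerate(change_pattern) if ch == target}
-- starts = sorted(i for i in hits if i - 1 not in hits); ends = sorted(i + 1 for i in hits if i + 1 not in hits)
-- return [get_waypoint(s, e, fw, bw) for s, e in zip(starts, ends)]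
def track_changes_alt (change_pattern : String) (target : String) (forward_waypoints : List Int) (backward_waypoints : List Int) : List (Int × Int) :=
  let hits : PySem.Set Int := PySem.Set.ofList
    (((PySem.List.enumerate change_pattern.toList 0).filter
        (fun p => decide (String.singleton p.2 = target))).map Prod.fst)
  let starts := PySem.List.sorted (hits.filter (fun i => !(PySem.Set.contains hits (i - 1)))) (fun x => x) false
  let ends := PySem.List.sorted ((hits.filter (fun i => !(PySem.Set.contains hits (i + 1)))).map (fun i => i + 1)) (fun x => x) false
  (starts.zip ends).map (fun p => get_waypoint p.1 p.2 forward_waypoints backward_waypoints)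

-- ===== PRECONDITION & SPEC =====
-- Pre_ excludes exactly the inputs on which Python A (and B identically) raises IndexError in get_waypoint:
-- a maximal run of the target character whose start index is not an index of backward_waypoints or whose
-- last index is not an index of forward_waypoints.
def Pre_track_changes (change_pattern : String) (target : String) (forward_waypoints : List Int) (backward_waypoints : List Int) : Prop :=
  ∀ i : Fin change_pattern.toList.length,
    String.singleton change_pattern.toList[i] = target →
    (((i : Nat) = 0 ∨ String.singleton (change_pattern.toList[(i : Nat) - 1]!) ≠ target) → (i : Nat) < backward_waypoints.length) ∧
    (((i : Nat) = change_pattern.toList.length - 1 ∨ String.singleton (change_pattern.toList[(i : Nat) + 1]!) ≠ target) → (i : Nat) < forward_waypoints.length)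

instance (change_pattern : String) (target : String) (forward_waypoints : List Int) (backward_waypoints : List Int) : Decidable (Pre_track_changes change_pattern target forward_waypoints backward_waypoints) := by unfold Pre_track_changes; infer_instance

def pvWitness_track_changes : String × String × List Int × List Int := ("aab", "a", [-1, -1, -1], [2, -1, -1])

def Spec_track_changes (change_pattern : String) (target : String) (forward_waypoints : List Int) (backward_waypoints : List Int) (out : List (Int × Int)) : Prop := out = track_changes_alt change_pattern target forward_waypoints backward_waypoints
instance (change_pattern : String) (target : String) (forward_waypoints : List Int) (backward_waypoints : List Int) (out : List (Int × Int)) : Decidable (Spec_track_changes change_pattern target forward_waypoints backward_waypoints out) := by unfold Spec_track_changes; infer_instance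

-- ===== CLAIM (what is proved, stated in full; the proofs are below) =====
def Claim_equal_track_changes : Prop := ∀ (change_pattern : String) (target : String) (forward_waypoints : List Int) (backward_waypoints : List Int), Dom_track_changes change_pattern target forward_waypoints backward_waypoints → Pre_track_changes change_pattern target forward_waypoints backward_waypoints → Spec_track_changes change_pattern target forward_waypoints backward_waypoints (track_changes change_pattern target forward_waypoints backward_waypoints)

-- ===== LEMMAS AND PROOFS =====

/-- Proof-side normal form both ports are reduced to: the run-length groups of the string … -/
def pvRle : List Char → List (Char × Nat)
  | [] => []
  | c :: rest =>
    (c, (rest.takeWhile (· == c)).length + 1) :: pvRle (rest.dropWhile (· == c))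
termination_by l => l.length
decreasing_by
  simp only [List.length_cons]
  have := List.length_dropWhile_le (· == c) rest
  omega

/-- … traversed with a running position. -/
def pvGroups (target : String) (fw bw : List Int) : List (Char × Nat) → Int → List (Int × Int)
  | [], _ => []
  | (key, n) :: rest, pos =>
    if String.singleton key = target then
      get_waypoint pos (pos + n) fw bw :: pvGroups target fw bw rest (pos + n)
    else pvGroups target fw bw rest (pos + n)

/-- The trailing flush of A's loop, as a function of the end index and the final state. -/
def pvFinish (_target : String) (fw bw : List Int) (e : Int) (r : List (Int × Int) × Bool × Int) : List (Int × Int) :=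
  if r.2.1 then r.1 ++ [get_waypoint r.2.2 e fw bw] else r.1

lemma pv_enum_cons (c : Char) (xs : List Char) (i : Int) :
    PySem.List.enumerate (c :: xs) i = (i, c) :: PySem.List.enumerate xs (i + 1) := by
  simp [PySem.List.enumerate]

/-- Non-target characters are a no-op in the closed state. -/
lemma pv_skip_closed (target : String) (fw bw : List Int) (chs : List Char)
    (h : ∀ x ∈ chs, String.singleton x ≠ target) (acc : List (Int × Int)) (s0 i : Int) :
    (PySem.List.enumerate chs i).foldl (pvStepA target fw bw) (acc, false, s0) = (acc, false, s0) := by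
  induction chs generalizing i with
  | nil => simp [PySem.List.enumerate]
  | cons c cs ih =>
    rw [pv_enum_cons, List.foldl_cons]
    have hc := h c (by simp)
    simp only [pvStepA, if_neg hc]
    norm_num
    exact ih (fun x hx => h x (by simp [hx])) (i + 1)

/-- Target characters are a no-op in the open state. -/
lemma pv_skip_open (target : String) (fw bw : List Int) (chs : List Char)
    (h : ∀ x ∈ chs, String.singleton x = target) (acc : List (Int × Int)) (st i : Int) :
    (PySem.List.enumerate chs i).foldl (pvStepA target fw bw) (acc, true, st) = (acc, true, st) := by
  induction chs generalizing i with
  | nil => simp [PySem.List.enumerate]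
  | cons c cs ih =>
    rw [pv_enum_cons, List.foldl_cons]
    have hc := h c (by simp)
    simp only [pvStepA, if_pos hc]
    norm_num
    exact ih (fun x hx => h x (by simp [hx])) (i + 1)

lemma pv_singleton_inj {c d : Char} (h : String.singleton c = String.singleton d) : c = d := by
  have h2 := congrArg String.toList h
  simpa [String.singleton] using h2

/-- A-side invariant: A's loop from a closed state, followed by the trailing flush,
    computes the group pass prefixed by the accumulator. -/
theorem pv_main (target : String) (fw bw : List Int) (ls : List Char)
    (acc : List (Int × Int)) (s0 i : Int) :
    pvFinish target fw bw (i + ls.length)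
      ((PySem.List.enumerate ls i).foldl (pvStepA target fw bw) (acc, false, s0))
    = acc ++ pvGroups target fw bw (pvRle ls) i := by
  match ls with
  | [] => simp [PySem.List.enumerate, pvRle, pvGroups, pvFinish]
  | c :: rest =>
    have hsplit : rest.takeWhile (· == c) ++ rest.dropWhile (· == c) = rest :=
      List.takeWhile_append_dropWhile
    have hlen := congrArg List.length hsplit
    simp only [List.length_append] at hlen
    have henum : PySem.List.enumerate rest (i + 1)
        = PySem.List.enumerate (rest.takeWhile (· == c)) (i + 1)
          ++ PySem.List.enumerate (rest.dropWhile (· == c)) ((i + 1) + (rest.takeWhile (· == c)).length) := by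
      conv_lhs => rw [← hsplit]
      exact PySem.List.enumerate_append _ _ _
    rw [pv_enum_cons, List.foldl_cons, henum, List.foldl_append]
    by_cases hc : String.singleton c = target
    · -- the head opens a run at index i
      have hstep : pvStepA target fw bw (acc, false, s0) (i, c) = (acc, true, i) := by
        simp [pvStepA, hc]
      rw [hstep, pv_skip_open target fw bw _
        (fun x hx => by rw [show x = c by simpa using List.mem_takeWhile_imp hx]; exact hc)]
      rcases hdw : rest.dropWhile (· == c) with _ | ⟨d, ds⟩
      · -- run reaches the end of the string: trailing flush
        rw [hdw] at hlen
        simp only [List.length_nil, Nat.add_zero] at hlen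
        simp [PySem.List.enumerate, pvFinish, pvRle, hdw, pvGroups, hc, hlen]
      · -- run closed by a different character d
        have hdne : (d == c) = false := by
          have h1 := List.head?_dropWhile_not (· == c) rest
          rw [hdw] at h1
          simpa using h1
        have hdtgt : ¬ String.singleton d = target := by
          intro h
          have : d = c := pv_singleton_inj (h.trans hc.symm)
          simp [this] at hdne
        rw [hdw] at hlen
        rw [pv_enum_cons, List.foldl_cons]
        have hstep2 : pvStepA target fw bw (acc, true, i) (i + 1 + ((rest.takeWhile (· == c)).length : Int), d)
            = (acc ++ [get_waypoint i (i + 1 + ((rest.takeWhile (· == c)).length : Int)) fw bw], false, i) := by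
          simp [pvStepA, hdtgt]
        rw [hstep2]
        have ih := pv_main target fw bw (d :: ds)
          (acc ++ [get_waypoint i (i + 1 + ((rest.takeWhile (· == c)).length : Int)) fw bw]) i
          (i + 1 + ((rest.takeWhile (· == c)).length : Int))
        rw [pv_enum_cons, List.foldl_cons] at ih
        have hstep3 : pvStepA target fw bw
            (acc ++ [get_waypoint i (i + 1 + ((rest.takeWhile (· == c)).length : Int)) fw bw], false, i)
            (i + 1 + ((rest.takeWhile (· == c)).length : Int), d)
            = (acc ++ [get_waypoint i (i + 1 + ((rest.takeWhile (· == c)).length : Int)) fw bw], false, i) := by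
          simp [pvStepA, hdtgt]
        rw [hstep3] at ih
        have hend : i + ((c :: rest).length : Int)
            = i + 1 + ((rest.takeWhile (· == c)).length : Int) + ((d :: ds).length : Int) := by
          simp only [List.length_cons] at hlen ⊢
          push_cast
          omega
        rw [hend, ih]
        have hpos : i + (((rest.takeWhile (· == c)).length + 1 : Nat) : Int)
            = i + 1 + ((rest.takeWhile (· == c)).length : Int) := by push_cast; omega
        simp only [pvRle, hdw, pvGroups, if_pos hc, List.append_assoc, List.singleton_append]
        rw [show i + 1 + ((rest.takeWhile (· == c)).length : Int)
            = i + (((rest.takeWhile (· == c)).length : Int) + 1) from by ring]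
        push_cast
        rfl
    · -- the head is not the target: the whole run is skipped
      have hstep : pvStepA target fw bw (acc, false, s0) (i, c) = (acc, false, s0) := by
        simp [pvStepA, hc]
      rw [hstep, pv_skip_closed target fw bw _
        (fun x hx => by rw [show x = c by simpa using List.mem_takeWhile_imp hx]; exact hc)]
      have ih := pv_main target fw bw (rest.dropWhile (· == c)) acc s0
        (i + 1 + ((rest.takeWhile (· == c)).length : Int))
      have hend : i + ((c :: rest).length : Int)
          = i + 1 + ((rest.takeWhile (· == c)).length : Int) + ((rest.dropWhile (· == c)).length : Int) := by
        simp only [List.length_cons]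
        push_cast
        omega
      rw [hend, ih]
      have hpos : i + (((rest.takeWhile (· == c)).length + 1 : Nat) : Int)
          = i + 1 + ((rest.takeWhile (· == c)).length : Int) := by push_cast; omega
      simp only [pvRle, pvGroups, if_neg hc]
      congr 1
      congr 1
      push_cast
      ring
termination_by ls.length
decreasing_by
  all_goals
    simp only [List.length_cons]
    try (have h1 := List.length_dropWhile_le (· == c) rest; rw [hdw] at h1;
         simp only [List.length_cons] at h1; omega)
    try (have h1 := List.length_dropWhile_le (· == c) rest; omega)

-- ===== B-side lemmas =====

/-- The hit-index list B's set is built from. -/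
def pvHits (target : String) (ls : List Char) (i : Int) : List Int :=
  ((PySem.List.enumerate ls i).filter (fun p => decide (String.singleton p.2 = target))).map Prod.fst

/-- B's boundary-pairing computation on a hit list. -/
def pvZipOut (fw bw : List Int) (H : List Int) : List (Int × Int) :=
  ((H.filter (fun x => !(H.contains (x - 1)))).zip
    ((H.filter (fun x => !(H.contains (x + 1)))).map (fun x => x + 1))).map
    (fun p => get_waypoint p.1 p.2 fw bw)

lemma pvHits_nil (target : String) (i : Int) : pvHits target [] i = [] := by
  simp [pvHits, PySem.List.enumerate]

lemma pvHits_cons (target : String) (c : Char) (rest : List Char) (i : Int) :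
    pvHits target (c :: rest) i
    = (if String.singleton c = target then [i] else []) ++ pvHits target rest (i + 1) := by
  simp only [pvHits, pv_enum_cons, List.filter_cons]
  by_cases hc : String.singleton c = target <;> simp [hc]

lemma pvHits_append (target : String) (xs ys : List Char) (i : Int) :
    pvHits target (xs ++ ys) i = pvHits target xs i ++ pvHits target ys (i + xs.length) := by
  simp [pvHits, PySem.List.enumerate_append, List.filter_append]

lemma pv_range_map_shift (i : Int) (k : Nat) :
    (List.range (k + 1)).map (fun t : Nat => i + (t : Int)) = i :: (List.range k).map (fun t : Nat => (i + 1) + (t : Int)) := by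
  rw [List.range_succ_eq_map]
  simp only [List.map_cons, List.map_map, Nat.cast_zero, add_zero]
  congr 1
  apply List.map_congr_left
  intro t _
  simp only [Function.comp]
  push_cast
  ring

lemma pvHits_all_target (target : String) (xs : List Char)
    (h : ∀ x ∈ xs, String.singleton x = target) (i : Int) :
    pvHits target xs i = (List.range xs.length).map (fun t : Nat => i + (t : Int)) := by
  induction xs generalizing i with
  | nil => simp [pvHits_nil]
  | cons c cs ih =>
    rw [pvHits_cons, if_pos (h c (by simp)), ih (fun x hx => h x (by simp [hx]))]
    rw [List.length_cons, pv_range_map_shift i cs.length]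
    rfl

lemma pvHits_none_target (target : String) (xs : List Char)
    (h : ∀ x ∈ xs, String.singleton x ≠ target) (i : Int) :
    pvHits target xs i = [] := by
  induction xs generalizing i with
  | nil => simp [pvHits_nil]
  | cons c cs ih =>
    rw [pvHits_cons, if_neg (h c (by simp)), ih (fun x hx => h x (by simp [hx]))]
    simp

lemma pvHits_lb (target : String) (xs : List Char) (i : Int) :
    ∀ x ∈ pvHits target xs i, i ≤ x := by
  induction xs generalizing i with
  | nil => simp [pvHits_nil]
  | cons c cs ih =>
    intro x hx
    rw [pvHits_cons] at hx
    rcases List.mem_append.1 hx with h1 | h1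
    · by_cases hc : String.singleton c = target <;> simp [hc] at h1
      omega
    · have := ih (i + 1) x h1
      omega

lemma pvHits_pairwise (target : String) (xs : List Char) (i : Int) :
    (pvHits target xs i).Pairwise (· < ·) := by
  induction xs generalizing i with
  | nil => simp [pvHits_nil]
  | cons c cs ih =>
    rw [pvHits_cons]
    by_cases hc : String.singleton c = target
    · simp only [hc]
      refine List.Pairwise.cons ?_ (ih (i + 1))
      intro x hx
      have := pvHits_lb target cs (i + 1) x hx
      omega
    · simp only [if_neg hc, List.nil_append]
      exact ih (i + 1)

lemma pv_filter_range_zero (k : Nat) :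
    (List.range (k + 1)).filter (fun j => j == 0) = [0] := by
  induction k with
  | zero => decide
  | succ m ih =>
    rw [List.range_succ, List.filter_append, ih]
    simp

lemma pv_filter_range_last (k : Nat) :
    (List.range (k + 1)).filter (fun j => j == k) = [k] := by
  rw [List.range_succ, List.filter_append]
  have h1 : (List.range k).filter (fun j => j == k) = [] := by
    rw [List.filter_eq_nil_iff]
    intro a ha
    simp only [List.mem_range] at ha
    simp
    omega
  simp [h1]

lemma pv_mem_range_map (i x : Int) (k : Nat) :
    x ∈ (List.range (k + 1)).map (fun t : Nat => i + (t : Int)) ↔ i ≤ x ∧ x ≤ i + k := by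
  constructor
  · intro h
    obtain ⟨t, ht, heq⟩ := List.mem_map.1 h
    rw [List.mem_range] at ht
    omega
  · rintro ⟨h1, h2⟩
    exact List.mem_map.2 ⟨(x - i).toNat, List.mem_range.2 (by omega), by omega⟩

/-- One maximal run [i .. i+k] in front of a hit list whose elements are ≥ i+k+2:
    the boundary pairing peels off exactly the waypoint (i, i+k+1). -/
lemma pv_zipOut_run (fw bw : List Int) (i : Int) (k : Nat) (Hd : List Int)
    (hdlb : ∀ x ∈ Hd, i + k + 2 ≤ x) :
    pvZipOut fw bw ((List.range (k + 1)).map (fun t : Nat => i + (t : Int)) ++ Hd)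
      = get_waypoint i (i + k + 1) fw bw :: pvZipOut fw bw Hd := by
  have hmem : ∀ x : Int,
      x ∈ (List.range (k + 1)).map (fun t : Nat => i + (t : Int)) ++ Hd
        ↔ ((i ≤ x ∧ x ≤ i + k) ∨ x ∈ Hd) := by
    intro x
    rw [List.mem_append, pv_mem_range_map]
  have hstarts :
      ((List.range (k + 1)).map (fun t : Nat => i + (t : Int)) ++ Hd).filter
        (fun x => !(((List.range (k + 1)).map (fun t : Nat => i + (t : Int)) ++ Hd).contains (x - 1)))
      = i :: Hd.filter (fun x => !(Hd.contains (x - 1))) := by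
    rw [List.filter_append]
    have h1 : ((List.range (k + 1)).map (fun t : Nat => i + (t : Int))).filter
        (fun x => !(((List.range (k + 1)).map (fun t : Nat => i + (t : Int)) ++ Hd).contains (x - 1))) = [i] := by
      rw [List.filter_map]
      have h2 : (List.range (k + 1)).filter
          ((fun x => !(((List.range (k + 1)).map (fun t : Nat => i + (t : Int)) ++ Hd).contains (x - 1))) ∘ (fun t : Nat => i + (t : Int)))
          = (List.range (k + 1)).filter (fun j => j == 0) := by
        apply List.filter_congr
        intro j hj
        rw [List.mem_range] at hj
        simp only [Function.comp]
        by_cases hj0 : j = 0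
        · have hnm : ¬ (i + (j : Int) - 1) ∈ (List.range (k + 1)).map (fun t : Nat => i + (t : Int)) ++ Hd := by
            rw [hmem]
            push_neg
            refine ⟨by omega, fun hm => ?_⟩
            have := hdlb _ hm
            omega
          have hcf : ((List.range (k + 1)).map (fun t : Nat => i + (t : Int)) ++ Hd).contains (i + (j : Int) - 1) = false := by
            rw [List.contains_eq_mem]
            simpa using hnm
          rw [hcf]
          simp [hj0]
        · have hm : (i + (j : Int) - 1) ∈ (List.range (k + 1)).map (fun t : Nat => i + (t : Int)) ++ Hd := by
            rw [hmem]; left; omega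
          have hct : ((List.range (k + 1)).map (fun t : Nat => i + (t : Int)) ++ Hd).contains (i + (j : Int) - 1) = true := by
            rw [List.contains_eq_mem]
            simpa using hm
          rw [hct]
          simp [hj0]
      rw [h2, pv_filter_range_zero]
      simp
    have h3 : Hd.filter
        (fun x => !(((List.range (k + 1)).map (fun t : Nat => i + (t : Int)) ++ Hd).contains (x - 1)))
        = Hd.filter (fun x => !(Hd.contains (x - 1))) := by
      apply List.filter_congr
      intro x hx
      have hxlb := hdlb x hx
      have hiff : (x - 1) ∈ (List.range (k + 1)).map (fun t : Nat => i + (t : Int)) ++ Hd ↔ (x - 1) ∈ Hd := by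
        rw [hmem]
        constructor
        · rintro (h | h)
          · omega
          · exact h
        · intro h; right; exact h
      simp only [List.contains_eq_mem]
      exact congrArg (fun b => !b) (decide_eq_decide.mpr hiff)
    rw [h1, h3]
    simp
  have hends :
      ((List.range (k + 1)).map (fun t : Nat => i + (t : Int)) ++ Hd).filter
        (fun x => !(((List.range (k + 1)).map (fun t : Nat => i + (t : Int)) ++ Hd).contains (x + 1)))
      = (i + k) :: Hd.filter (fun x => !(Hd.contains (x + 1))) := by
    rw [List.filter_append]
    have h1 : ((List.range (k + 1)).map (fun t : Nat => i + (t : Int))).filter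
        (fun x => !(((List.range (k + 1)).map (fun t : Nat => i + (t : Int)) ++ Hd).contains (x + 1))) = [i + k] := by
      rw [List.filter_map]
      have h2 : (List.range (k + 1)).filter
          ((fun x => !(((List.range (k + 1)).map (fun t : Nat => i + (t : Int)) ++ Hd).contains (x + 1))) ∘ (fun t : Nat => i + (t : Int)))
          = (List.range (k + 1)).filter (fun j => j == k) := by
        apply List.filter_congr
        intro j hj
        rw [List.mem_range] at hj
        simp only [Function.comp]
        by_cases hjk : j = k
        · have hnm : ¬ (i + (j : Int) + 1) ∈ (List.range (k + 1)).map (fun t : Nat => i + (t : Int)) ++ Hd := by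
            rw [hmem]
            push_neg
            refine ⟨by omega, fun hm => ?_⟩
            have := hdlb _ hm
            omega
          have hcf : ((List.range (k + 1)).map (fun t : Nat => i + (t : Int)) ++ Hd).contains (i + (j : Int) + 1) = false := by
            rw [List.contains_eq_mem]
            simpa using hnm
          rw [hcf]
          simp [hjk]
        · have hm : (i + (j : Int) + 1) ∈ (List.range (k + 1)).map (fun t : Nat => i + (t : Int)) ++ Hd := by
            rw [hmem]; left; omega
          have hct : ((List.range (k + 1)).map (fun t : Nat => i + (t : Int)) ++ Hd).contains (i + (j : Int) + 1) = true := by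
            rw [List.contains_eq_mem]
            simpa using hm
          rw [hct]
          simp [hjk]
      rw [h2, pv_filter_range_last]
      simp
    have h3 : Hd.filter
        (fun x => !(((List.range (k + 1)).map (fun t : Nat => i + (t : Int)) ++ Hd).contains (x + 1)))
        = Hd.filter (fun x => !(Hd.contains (x + 1))) := by
      apply List.filter_congr
      intro x hx
      have hxlb := hdlb x hx
      have hiff : (x + 1) ∈ (List.range (k + 1)).map (fun t : Nat => i + (t : Int)) ++ Hd ↔ (x + 1) ∈ Hd := by
        rw [hmem]
        constructor
        · rintro (h | h)
          · omega
          · exact h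
        · intro h; right; exact h
      simp only [List.contains_eq_mem]
      exact congrArg (fun b => !b) (decide_eq_decide.mpr hiff)
    rw [h1, h3]
    simp
  unfold pvZipOut
  rw [hstarts, hends]
  simp only [List.map_cons, List.zip_cons_cons, List.map_cons]

/-- B-side invariant: the boundary-pairing of the hit list equals the group pass. -/
theorem pv_alt_main (target : String) (fw bw : List Int) (ls : List Char) (i : Int) :
    pvZipOut fw bw (pvHits target ls i) = pvGroups target fw bw (pvRle ls) i := by
  match ls with
  | [] => simp [pvHits_nil, pvZipOut, pvRle, pvGroups]
  | c :: rest =>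
    have hsplit : rest.takeWhile (· == c) ++ rest.dropWhile (· == c) = rest :=
      List.takeWhile_append_dropWhile
    by_cases hc : String.singleton c = target
    · -- a run [i .. i+k] followed by the hits of the dropWhile part, k = takeWhile length
      have htkall : ∀ x ∈ rest.takeWhile (· == c), String.singleton x = target := fun x hx => by
        rw [show x = c by simpa using List.mem_takeWhile_imp hx]; exact hc
      have hH : pvHits target (c :: rest) i
          = (List.range ((rest.takeWhile (· == c)).length + 1)).map (fun t : Nat => i + (t : Int))
            ++ pvHits target (rest.dropWhile (· == c)) (i + 1 + (rest.takeWhile (· == c)).length) := by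
        rw [pvHits_cons, if_pos hc]
        conv_lhs => rw [← hsplit]
        rw [pvHits_append, pvHits_all_target target _ htkall,
            pv_range_map_shift i (rest.takeWhile (· == c)).length]
        simp only [List.singleton_append, List.cons_append, List.nil_append]
      have hdlb : ∀ x ∈ pvHits target (rest.dropWhile (· == c)) (i + 1 + (rest.takeWhile (· == c)).length),
          i + (rest.takeWhile (· == c)).length + 2 ≤ x := by
        rcases hdw : rest.dropWhile (· == c) with _ | ⟨d, ds⟩
        · simp [pvHits_nil]
        · have hdne : (d == c) = false := by
            have h1 := List.head?_dropWhile_not (· == c) rest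
            rw [hdw] at h1
            simpa using h1
          have hdtgt : ¬ String.singleton d = target := by
            intro h
            have : d = c := pv_singleton_inj (h.trans hc.symm)
            simp [this] at hdne
          intro x hx
          rw [pvHits_cons, if_neg hdtgt, List.nil_append] at hx
          have := pvHits_lb target ds (i + 1 + (rest.takeWhile (· == c)).length + 1) x hx
          omega
      rw [hH, pv_zipOut_run fw bw i (rest.takeWhile (· == c)).length _ hdlb,
          pv_alt_main target fw bw (rest.dropWhile (· == c)) (i + 1 + (rest.takeWhile (· == c)).length)]
      simp only [pvRle, pvGroups, if_pos hc]
      have hcast : i + (((rest.takeWhile (· == c)).length + 1 : Nat) : Int)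
          = i + 1 + ((rest.takeWhile (· == c)).length : Int) := by push_cast; ring
      rw [hcast]
      have hcast2 : i + ((rest.takeWhile (· == c)).length : Int) + 1
          = i + 1 + ((rest.takeWhile (· == c)).length : Int) := by ring
      rw [hcast2]
    · -- head run is non-target: hits are exactly those of the dropWhile part
      have htkall : ∀ x ∈ rest.takeWhile (· == c), String.singleton x ≠ target := fun x hx => by
        rw [show x = c by simpa using List.mem_takeWhile_imp hx]; exact hc
      have hH : pvHits target (c :: rest) i
          = pvHits target (rest.dropWhile (· == c)) (i + 1 + (rest.takeWhile (· == c)).length) := by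
        rw [pvHits_cons, if_neg hc]
        conv_lhs => rw [← hsplit]
        rw [pvHits_append, pvHits_none_target target _ htkall]
        simp only [List.nil_append]
      rw [hH, pv_alt_main target fw bw (rest.dropWhile (· == c)) (i + 1 + (rest.takeWhile (· == c)).length)]
      simp only [pvRle, pvGroups, if_neg hc]
      have hcast : i + (((rest.takeWhile (· == c)).length + 1 : Nat) : Int)
          = i + 1 + ((rest.takeWhile (· == c)).length : Int) := by push_cast; ring
      rw [hcast]
termination_by ls.length
decreasing_by
  all_goals
    have h1 := List.length_dropWhile_le (· == c) rest
    simp only [List.length_cons]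
    omega

/-- B's port unfolds to the boundary-pairing of the hit list: the built list is Nodup
    (strictly increasing), so Set.ofList is the identity and the two sorteds are identities. -/
theorem pv_alt_eq (cp target : String) (fw bw : List Int) :
    track_changes_alt cp target fw bw = pvZipOut fw bw (pvHits target cp.toList 0) := by
  unfold track_changes_alt
  set H := pvHits target cp.toList 0 with hH
  have hpw : H.Pairwise (· < ·) := pvHits_pairwise target cp.toList 0
  have hnd : H.Nodup := List.Pairwise.imp (fun h => ne_of_lt h) hpw
  have hofl : PySem.Set.ofList
      (((PySem.List.enumerate cp.toList 0).filter
        (fun p => decide (String.singleton p.2 = target))).map Prod.fst) = H := by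
    rw [show ((PySem.List.enumerate cp.toList 0).filter
        (fun p => decide (String.singleton p.2 = target))).map Prod.fst = H from rfl]
    exact PySem.Set.ofList_eq_self_of_nodup _ hnd
  rw [hofl]
  simp only []
  have hs1 : PySem.List.sorted (H.filter (fun x => !(PySem.Set.contains H (x - 1)))) (fun x => x) false
      = H.filter (fun x => !(H.contains (x - 1))) := by
    apply PySem.List.sorted_eq_of_perm_of_pairwise_lt
    · simp [PySem.Set.contains]
    · exact (hpw.filter _)
  have hs2 : PySem.List.sorted ((H.filter (fun x => !(PySem.Set.contains H (x + 1)))).map (fun x => x + 1)) (fun x => x) false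
      = (H.filter (fun x => !(H.contains (x + 1)))).map (fun x => x + 1) := by
    apply PySem.List.sorted_eq_of_perm_of_pairwise_lt
    · simp [PySem.Set.contains]
    · refine (List.pairwise_map).2 ?_
      exact (hpw.filter _).imp (fun h => by omega)
  rw [hs1, hs2]
  rfl

-- ===== VERDICT (by name: the statement is the Claim_ definition above) =====
theorem track_changes_spec : Claim_equal_track_changes := by
  intro cp tgt fw bw _ _
  unfold Spec_track_changes track_changes
  have h := pv_main tgt fw bw cp.toList [] (-1) 0
  simp only [zero_add, List.nil_append] at h
  simp only [pvFinish] at h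
  rw [pv_alt_eq, pv_alt_main]
  rw [← h]
  simp [PySem.Str.len]
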